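-- pv_equiv track=rewrite | github.com/thesonofwind/truck-range-calculator | deneme_streamlit.py | calculate_elevation_gain_loss
-- ===== SOURCE A (Python) =====
-- def calculate_elevation_gain_loss(elevations):
--     """
--     Calculate total elevation gain and loss.
--     Args:
--         elevations (list): List of elevations in meters.
--     Returns:
--         tuple: (total_gain, total_loss) in meters.
--     """
--     total_gain = 0
--     total_loss = 0
--     for i in range(1, len(elevations)):
--         diff = elevations[i] - elevations[i - 1]
--         if diff > 0:
--             total_gain += diff
--         else:
--             total_loss += abs(diff)
--     return total_gain, total_loss
-- ===== SOURCE B (Python) =====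
-- def calculate_elevation_gain_loss(elevations):
--     """
--     Calculate total elevation gain and loss.
--     Args:
--         elevations (list): List of elevations in meters.
--     Returns:
--         tuple: (total_gain, total_loss) in meters.
--     """
--     # Different algorithm: total variation + telescoping net change.
--     # gain - loss = last - first (telescoping sum of diffs), and
--     # gain + loss = sum of |diffs| (total variation); solve the 2x2 system.
--     total_var = 0
--     for prev, cur in zip(elevations, elevations[1:]):
--         total_var += abs(cur - prev)
--     net = elevations[-1] - elevations[0] if elevations else 0
--     return ((total_var + net) // 2, (total_var - net) // 2)
-- ===== Notes on version B (the rewrite author's own statement) =====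
-- stated objective: alternative
-- what changed: Instead of accumulating gain and loss in separate branches, B computes a single total-variation sum of |diffs| plus the telescoped net change last-first, and recovers gain=(TV+net)/2 and loss=(TV-net)/2 from that 2x2 linear system.
import Mathlib
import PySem

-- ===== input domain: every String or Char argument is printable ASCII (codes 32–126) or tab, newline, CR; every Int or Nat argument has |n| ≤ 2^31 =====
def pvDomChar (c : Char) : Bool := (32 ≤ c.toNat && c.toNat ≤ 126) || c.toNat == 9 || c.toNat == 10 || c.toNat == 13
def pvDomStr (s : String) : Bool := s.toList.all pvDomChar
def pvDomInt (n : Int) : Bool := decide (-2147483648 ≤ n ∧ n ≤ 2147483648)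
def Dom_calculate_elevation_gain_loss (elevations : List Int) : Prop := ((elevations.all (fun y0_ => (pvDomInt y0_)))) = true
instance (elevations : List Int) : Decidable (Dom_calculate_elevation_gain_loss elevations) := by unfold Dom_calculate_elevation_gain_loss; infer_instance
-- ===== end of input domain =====

-- B computes gain/loss from the total variation of the diffs and the telescoped net change
-- (gain = (TV+net)/2, loss = (TV-net)/2) instead of A's branching accumulation (alternative algorithm).

-- ===== PORT A =====
-- literal port of A: index loop over range(1, len), one accumulating pair with a branch
def calculate_elevation_gain_loss (elevations : List Int) : Int × Int :=
  (PySem.List.pyRange 1 (PySem.List.len elevations) 1).foldl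
    (fun (acc : Int × Int) i =>
      let diff := PySem.List.pyGetD elevations i 0 - PySem.List.pyGetD elevations (i - 1) 0
      if diff > 0 then (acc.1 + diff, acc.2) else (acc.1, acc.2 + |diff|))
    (0, 0)

-- ===== PORT B =====
-- literal port of B: total variation over zip(xs, xs[1:]), net = xs[-1]-xs[0] (0 if empty),
-- then the two floor divisions recover gain and loss
def calculate_elevation_gain_loss_alt (elevations : List Int) : Int × Int :=
  let total_var := (elevations.zip (PySem.List.slice elevations (some 1) none)).foldl
    (fun acc p => acc + |p.2 - p.1|) 0
  let net := if elevations.isEmpty then 0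
    else PySem.List.pyGetD elevations (-1) 0 - PySem.List.pyGetD elevations 0 0
  (PySem.Int.floordiv (total_var + net) 2, PySem.Int.floordiv (total_var - net) 2)

-- ===== PRECONDITION & SPEC =====
def Spec_calculate_elevation_gain_loss (elevations : List Int) (out : Int × Int) : Prop := out = calculate_elevation_gain_loss_alt elevations
instance (elevations : List Int) (out : Int × Int) : Decidable (Spec_calculate_elevation_gain_loss elevations out) := by unfold Spec_calculate_elevation_gain_loss; infer_instance

-- ===== CLAIM =====
def Claim_equal_calculate_elevation_gain_loss : Prop := ∀ (elevations : List Int), Dom_calculate_elevation_gain_loss elevations → Spec_calculate_elevation_gain_loss elevations (calculate_elevation_gain_loss elevations)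

-- ===== LEMMAS AND PROOFS =====

-- diffs list of a list
def pvDiffs (xs : List Int) : List Int := (xs.zip xs.tail).map (fun p => p.2 - p.1)

-- gain / loss of a diffs list
def pvGain (ds : List Int) : Int := (ds.filter (fun d => d > 0)).sum
def pvLoss (ds : List Int) : Int := ((ds.filter (fun d => ¬ d > 0)).map (fun d => |d|)).sum

theorem pvGain_cons (d : Int) (ds : List Int) :
    pvGain (d :: ds) = (if d > 0 then d else 0) + pvGain ds := by
  by_cases h : d > 0 <;> simp [pvGain, h]

theorem pvLoss_cons (d : Int) (ds : List Int) :
    pvLoss (d :: ds) = (if d > 0 then 0 else |d|) + pvLoss ds := by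
  by_cases h : d > 0
  · simp [pvLoss, h]
  · have h2 : d ≤ 0 := by omega
    simp [pvLoss, h, h2]

-- the indices 1..n read through pyGetD are exactly the adjacent pairs of the list
theorem pv_map_range_eq_zip (xs : List Int) :
    (PySem.List.pyRange 1 (PySem.List.len xs) 1).map
      (fun i => (PySem.List.pyGetD xs (i - 1) 0, PySem.List.pyGetD xs i 0))
      = xs.zip xs.tail := by
  apply List.ext_getElem
  · simp [PySem.List.length_pyRange_one, PySem.List.len]
  · intro k h1 h2
    have hk : k + 1 < xs.length := by
      simp [PySem.List.length_pyRange_one, PySem.List.len] at h1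
      omega
    rw [List.getElem_map, PySem.List.getElem_pyRange_one]
    have e1 : (1 : Int) + (k : Int) - 1 = ((k : Nat) : Int) := by omega
    have e2 : (1 : Int) + (k : Int) = (((k + 1 : Nat)) : Int) := by push_cast; omega
    rw [e1, e2, PySem.List.pyGetD_natCast, PySem.List.pyGetD_natCast]
    simp [List.getD_eq_getElem?_getD, hk, Nat.lt_of_succ_lt hk,
      List.getElem_zip, List.getElem_tail]

theorem pv_map_range_diffs (xs : List Int) :
    (PySem.List.pyRange 1 (PySem.List.len xs) 1).map
      (fun i => PySem.List.pyGetD xs i 0 - PySem.List.pyGetD xs (i - 1) 0) = pvDiffs xs := by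
  rw [pvDiffs, ← pv_map_range_eq_zip xs, List.map_map]
  rfl

-- A's port is the branching fold over the diffs list
theorem pv_portA_eq (xs : List Int) :
    calculate_elevation_gain_loss xs
      = (pvDiffs xs).foldl (fun (acc : Int × Int) d =>
          if d > 0 then (acc.1 + d, acc.2) else (acc.1, acc.2 + |d|)) (0, 0) := by
  unfold calculate_elevation_gain_loss
  rw [← pv_map_range_diffs xs, List.foldl_map]

-- A's branching fold over diffs equals gain/loss, shifted by the accumulator
theorem pv_fold_eq_gain_loss (ds : List Int) (g l : Int) :
    ds.foldl (fun (acc : Int × Int) d =>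
        if d > 0 then (acc.1 + d, acc.2) else (acc.1, acc.2 + |d|)) (g, l)
      = (g + pvGain ds, l + pvLoss ds) := by
  induction ds generalizing g l with
  | nil => simp [pvGain, pvLoss]
  | cons d ds ih =>
    rw [List.foldl_cons, pvGain_cons, pvLoss_cons]
    by_cases hd : d > 0
    · rw [if_pos hd, if_pos hd, if_pos hd, ih, Prod.mk.injEq]
      constructor <;> ring
    · rw [if_neg hd, if_neg hd, if_neg hd, ih, Prod.mk.injEq]
      constructor <;> ring

-- B's total-variation fold is the sum of absolute diffs, shifted by the accumulator
theorem pv_fold_abs (ds : List Int) (t : Int) :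
    ds.foldl (fun acc d => acc + |d|) t = t + (ds.map (fun d => |d|)).sum := by
  induction ds generalizing t with
  | nil => simp
  | cons d ds ih => simp [ih]; ring

-- total variation = gain + loss
theorem pv_tv_eq (ds : List Int) : (ds.map (fun d => |d|)).sum = pvGain ds + pvLoss ds := by
  induction ds with
  | nil => simp [pvGain, pvLoss]
  | cons d ds ih =>
    rw [List.map_cons, List.sum_cons, pvGain_cons, pvLoss_cons, ih]
    by_cases hd : d > 0
    · rw [if_pos hd, if_pos hd, abs_of_pos hd]; ring
    · rw [if_neg hd, if_neg hd]; ring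

-- net change = gain - loss
theorem pv_net_eq (ds : List Int) : ds.sum = pvGain ds - pvLoss ds := by
  induction ds with
  | nil => simp [pvGain, pvLoss]
  | cons d ds ih =>
    rw [List.sum_cons, pvGain_cons, pvLoss_cons, ih]
    by_cases hd : d > 0
    · rw [if_pos hd, if_pos hd]; ring
    · rw [if_neg hd, if_neg hd, abs_of_nonpos (by omega)]; ring

-- telescoping: the diffs sum to last - first
theorem pv_telescope (x : Int) (t : List Int) :
    (pvDiffs (x :: t)).sum = (x :: t).getLast (by simp) - x := by
  induction t generalizing x with
  | nil => simp [pvDiffs]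
  | cons b t ih =>
    have h1 : pvDiffs (x :: b :: t) = (b - x) :: pvDiffs (b :: t) := by
      simp [pvDiffs]
    have h2 : (x :: b :: t).getLast (by simp) = (b :: t).getLast (by simp) := rfl
    rw [h1, List.sum_cons, ih b, h2]
    ring

theorem pv_floordiv_two_mul (g : Int) : PySem.Int.floordiv (2 * g) 2 = g := by
  rw [PySem.Int.floordiv_eq_ediv_of_pos (by norm_num)]
  exact Int.mul_ediv_cancel_left g (by norm_num)

-- ===== VERDICT =====
theorem calculate_elevation_gain_loss_spec : Claim_equal_calculate_elevation_gain_loss := by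
  intro xs _
  unfold Spec_calculate_elevation_gain_loss
  rw [pv_portA_eq, pv_fold_eq_gain_loss]
  unfold calculate_elevation_gain_loss_alt
  rw [PySem.List.slice_from_one]
  have htv : (xs.zip xs.tail).foldl (fun acc p => acc + |p.2 - p.1|) 0
      = pvGain (pvDiffs xs) + pvLoss (pvDiffs xs) := by
    have h1 : (xs.zip xs.tail).foldl (fun acc p => acc + |p.2 - p.1|) 0
        = ((pvDiffs xs).map (fun d => |d|)).sum := by
      rw [show (xs.zip xs.tail).foldl (fun acc p => acc + |p.2 - p.1|) 0
          = ((xs.zip xs.tail).map (fun p => p.2 - p.1)).foldl (fun (acc : Int) d => acc + |d|) 0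
        from by rw [List.foldl_map], pv_fold_abs, pvDiffs, List.map_map]
      simp
    rw [h1, pv_tv_eq]
  rw [htv]
  cases xs with
  | nil => simp [pvDiffs, pvGain, pvLoss, PySem.Int.floordiv]
  | cons x t =>
    have hnet : PySem.List.pyGetD (x :: t) (-1) 0 - PySem.List.pyGetD (x :: t) 0 0
        = pvGain (pvDiffs (x :: t)) - pvLoss (pvDiffs (x :: t)) := by
      rw [PySem.List.pyGetD_neg_one (x :: t) 0 (by simp), PySem.List.pyGetD_zero_cons,
        ← pv_net_eq, pv_telescope]
    rw [if_neg (by simp), hnet, Prod.mk.injEq]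
    constructor
    · rw [show pvGain (pvDiffs (x :: t)) + pvLoss (pvDiffs (x :: t)) +
          (pvGain (pvDiffs (x :: t)) - pvLoss (pvDiffs (x :: t)))
          = 2 * pvGain (pvDiffs (x :: t)) from by ring, pv_floordiv_two_mul]
      ring
    · rw [show pvGain (pvDiffs (x :: t)) + pvLoss (pvDiffs (x :: t)) -
          (pvGain (pvDiffs (x :: t)) - pvLoss (pvDiffs (x :: t)))
          = 2 * pvLoss (pvDiffs (x :: t)) from by ring, pv_floordiv_two_mul]
      ring
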